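-- pv_equiv track=rewrite | github.com/drmrgd/biofx_utils | get_pathway.py | get_pathway_by_gene
-- ===== SOURCE A (Python) =====
-- def get_pathway_by_gene(pathway_data, gene_list):
--     """
--     Input a gene list and output a set of pathways that correspond to that
--     mapping.
--     """
--     results = {}
--
--     for g in gene_list:
--         results[g] = []
--         for p in pathway_data.keys():
--             if g in pathway_data[p]:
--                 results[g].append(p)
--     return results
-- ===== SOURCE B (Python) =====
-- def get_pathway_by_gene(pathway_data, gene_list):
--     """
--     Input a gene list and output a set of pathways that correspond to that
--     mapping.  (Inverted-index re-implementation: one pass over the pathways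
--     builds gene -> [pathways], then each requested gene is a single lookup.)
--     """
--     index = {}
--     for p, genes in pathway_data.items():
--         for g in genes:
--             ps = index.get(g)
--             if ps is None:
--                 index[g] = [p]
--             elif p not in ps:
--                 ps.append(p)
--     return {g: index.get(g, []) for g in gene_list}
-- ===== Notes on version B (the rewrite author's own statement) =====
-- stated objective: faster
-- what changed: Replaced the per-gene scan over all pathways by a single pass over the pathways that builds an inverted index gene->pathways, so each requested gene becomes one dictionary lookup.
import Mathlib
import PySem

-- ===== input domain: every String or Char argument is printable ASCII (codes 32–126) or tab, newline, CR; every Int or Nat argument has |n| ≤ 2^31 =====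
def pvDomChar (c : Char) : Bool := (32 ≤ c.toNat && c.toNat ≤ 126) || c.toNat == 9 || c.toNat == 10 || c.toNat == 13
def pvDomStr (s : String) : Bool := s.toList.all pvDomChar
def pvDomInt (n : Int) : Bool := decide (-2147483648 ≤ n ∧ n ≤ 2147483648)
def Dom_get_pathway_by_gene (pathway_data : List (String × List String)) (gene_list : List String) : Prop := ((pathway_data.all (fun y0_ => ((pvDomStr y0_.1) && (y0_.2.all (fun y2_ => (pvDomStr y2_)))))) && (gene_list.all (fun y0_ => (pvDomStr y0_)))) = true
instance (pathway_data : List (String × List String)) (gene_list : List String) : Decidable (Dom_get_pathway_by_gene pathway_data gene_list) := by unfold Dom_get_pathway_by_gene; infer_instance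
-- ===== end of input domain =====

-- B builds an inverted index gene -> pathways in one pass over the pathways instead of
-- scanning every pathway for every gene (objective: faster, asymptotically).

-- ===== PORT A =====
def get_pathway_by_gene (pathway_data : List (String × List String)) (gene_list : List String) : List (String × List String) :=
  let d : PySem.Dict String (List String) := PySem.Dict.ofList pathway_data
  (gene_list.foldl
    (fun results g =>
      results.insert g
        (d.keys.foldl (fun acc p => if (d.getD p []).contains g then acc ++ [p] else acc) []))
    PySem.Dict.empty).items

-- ===== PORT B =====
-- one gene of one pathway: record p under g unless already recorded
def pvAddOnce (idx : PySem.Dict String (List String)) (p g : String) : PySem.Dict String (List String) :=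
  match idx.get? g with
  | none => idx.insert g [p]
  | some ps => if ps.contains p then idx else idx.insert g (ps ++ [p])

def pvBuildIndex (items : List (String × List String)) : PySem.Dict String (List String) :=
  items.foldl (fun idx pr => pr.2.foldl (fun idx g => pvAddOnce idx pr.1 g) idx) PySem.Dict.empty

def get_pathway_by_gene_alt (pathway_data : List (String × List String)) (gene_list : List String) : List (String × List String) :=
  let idx := pvBuildIndex (PySem.Dict.ofList pathway_data).items
  (gene_list.foldl (fun r g => r.insert g (idx.getD g [])) PySem.Dict.empty).items

-- ===== PRECONDITION & SPEC =====
def Spec_get_pathway_by_gene (pathway_data : List (String × List String)) (gene_list : List String) (out : List (String × List String)) : Prop := out = get_pathway_by_gene_alt pathway_data gene_list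
instance (pathway_data : List (String × List String)) (gene_list : List String) (out : List (String × List String)) : Decidable (Spec_get_pathway_by_gene pathway_data gene_list out) := by unfold Spec_get_pathway_by_gene; infer_instance

-- ===== CLAIM (what is proved, stated in full; the proofs are below) =====
def Claim_equal_get_pathway_by_gene : Prop := ∀ (pathway_data : List (String × List String)) (gene_list : List String), Dom_get_pathway_by_gene pathway_data gene_list → Spec_get_pathway_by_gene pathway_data gene_list (get_pathway_by_gene pathway_data gene_list)

-- ===== LEMMAS AND PROOFS =====

-- A's inner scan over d.keys, expressed as a filter of d.items
theorem pv_innerA (g : String) (d : PySem.Dict String (List String))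
    (L : List (String × List String)) (hv : ∀ pr ∈ L, d.getD pr.1 [] = pr.2) (acc : List String) :
    (L.map (·.1)).foldl (fun acc p => if (d.getD p []).contains g then acc ++ [p] else acc) acc
      = acc ++ (L.filter (fun pr => pr.2.contains g)).map (·.1) := by
  induction L generalizing acc with
  | nil => simp
  | cons pr rest ih =>
    have h1 : d.getD pr.1 [] = pr.2 := hv pr (by simp)
    have h2 : ∀ q ∈ rest, d.getD q.1 [] = q.2 := fun q hq => hv q (by simp [hq])
    simp only [List.map_cons, List.foldl_cons, List.filter_cons, h1]
    rw [ih h2]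
    by_cases hg : g ∈ pr.2 <;> simp [hg]

-- pvAddOnce in closed form
theorem pv_addOnce_eq (idx : PySem.Dict String (List String)) (p g : String) :
    pvAddOnce idx p g =
      if p ∈ idx.getD g [] then idx else idx.insert g (idx.getD g [] ++ [p]) := by
  unfold pvAddOnce
  cases h : idx.get? g with
  | none =>
    have : idx.getD g [] = [] := PySem.Dict.getD_of_get?_eq_none _ _ h
    simp [this]
  | some ps =>
    have : idx.getD g [] = ps := PySem.Dict.getD_of_get?_eq_some _ _ h
    by_cases hp : p ∈ ps <;> simp [this, hp]

-- effect of folding one pathway's gene list into the index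
theorem pv_innerB (p : String) (genes : List String)
    (idx : PySem.Dict String (List String)) (g : String) :
    (genes.foldl (fun idx g => pvAddOnce idx p g) idx).getD g []
      = idx.getD g [] ++ (if g ∈ genes ∧ p ∉ idx.getD g [] then [p] else []) := by
  induction genes generalizing idx with
  | nil => simp
  | cons x rest ih =>
    simp only [List.foldl_cons]
    rw [ih, pv_addOnce_eq]
    by_cases hp : p ∈ idx.getD x []
    · simp only [if_pos hp]
      by_cases hgx : g = x
      · subst hgx; simp [hp]
      · simp [List.mem_cons, hgx]
    · simp only [if_neg hp]
      by_cases hgx : g = x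
      · subst hgx
        simp [hp]
      · rw [PySem.Dict.getD_insert, if_neg hgx]
        simp [List.mem_cons, hgx]

-- effect of building the whole index
theorem pv_outerB (L : List (String × List String)) (idx : PySem.Dict String (List String))
    (hnd : (L.map (·.1)).Nodup) (hfresh : ∀ g, ∀ pr ∈ L, pr.1 ∉ idx.getD g []) (g : String) :
    (L.foldl (fun idx pr => pr.2.foldl (fun idx g => pvAddOnce idx pr.1 g) idx) idx).getD g []
      = idx.getD g [] ++ (L.filter (fun pr => pr.2.contains g)).map (·.1) := by
  induction L generalizing idx with
  | nil => simp
  | cons pr rest ih =>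
    simp only [List.map_cons, List.nodup_cons] at hnd
    have hself : ∀ g', pr.1 ∉ idx.getD g' [] := fun g' => hfresh g' pr (by simp)
    have step : ∀ g', (pr.2.foldl (fun idx g => pvAddOnce idx pr.1 g) idx).getD g' []
        = idx.getD g' [] ++ (if g' ∈ pr.2 then [pr.1] else []) := by
      intro g'
      rw [pv_innerB]
      simp [hself g']
    have hfresh' : ∀ g', ∀ q ∈ rest, q.1 ∉ (pr.2.foldl (fun idx g => pvAddOnce idx pr.1 g) idx).getD g' [] := by
      intro g' q hq
      rw [step]
      have hne : q.1 ≠ pr.1 := by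
        intro he; exact hnd.1 (by rw [← he]; exact List.mem_map_of_mem hq)
      simp only [List.mem_append]
      rintro (h | h)
      · exact hfresh g' q (by simp [hq]) h
      · split at h <;> simp_all
    simp only [List.foldl_cons]
    rw [ih _ hnd.2 hfresh', step, List.filter_cons]
    by_cases hg : g ∈ pr.2
    · simp [hg, List.append_assoc]
    · simp [hg]

-- per-gene agreement of the two computed values
theorem pv_value_eq (pathway_data : List (String × List String)) (g : String) :
    (PySem.Dict.ofList pathway_data).keys.foldl
        (fun acc p => if ((PySem.Dict.ofList pathway_data).getD p []).contains g then acc ++ [p] else acc) []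
      = (pvBuildIndex (PySem.Dict.ofList pathway_data).items).getD g [] := by
  set d := PySem.Dict.ofList pathway_data with hd
  have hnd : d.keys.Nodup := PySem.Dict.nodup_keys_ofList pathway_data
  have hkeys : d.keys = d.items.map (·.1) := rfl
  have hv : ∀ pr ∈ d.items, d.getD pr.1 [] = pr.2 := by
    intro pr hpr
    obtain ⟨k, v⟩ := pr
    exact PySem.Dict.getD_of_mem_items _ hpr hnd []
  rw [hkeys, pv_innerA g d d.items hv []]
  unfold pvBuildIndex
  rw [pv_outerB d.items PySem.Dict.empty (by rw [← hkeys]; exact hnd)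
        (by intro g' pr _; simp [PySem.Dict.getD_empty]) g]
  simp [PySem.Dict.getD_empty]

-- ===== VERDICT (by name: the statement is the Claim_ definition above) =====
theorem get_pathway_by_gene_spec : Claim_equal_get_pathway_by_gene := by
  intro pathway_data gene_list _
  unfold Spec_get_pathway_by_gene get_pathway_by_gene get_pathway_by_gene_alt
  have hfun : (fun (results : PySem.Dict String (List String)) g =>
        results.insert g
          ((PySem.Dict.ofList pathway_data).keys.foldl
            (fun acc p => if ((PySem.Dict.ofList pathway_data).getD p []).contains g then acc ++ [p] else acc) []))
      = (fun (r : PySem.Dict String (List String)) g =>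
          r.insert g ((pvBuildIndex (PySem.Dict.ofList pathway_data).items).getD g [])) := by
    funext r g
    rw [pv_value_eq]
  simp only [hfun]
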